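-- pv_equiv track=rewrite | github.com/sos440/re-scripts | lootmaster_2/modules/match.py | to_interval
-- ===== SOURCE A (Python) =====
-- from typing import Any, Iterable, List, Dict, Tuple, Optional, TypeVar, Generic, Union, Generator, Callable
--
-- def to_interval(values: Iterable[int]) -> str:
--     """
--     Convert a list of integers to a string interval.
--
--     1. If the list contains consecutive integers, represent them as a range "start...end".
--     2. If the list contains non-consecutive integers, represent them as a comma-separated list.
--     """
--     sorted_values: List[Optional[int]] = []
--     sorted_values.extend(sorted(set(values)))
--     sorted_values.append(None)  # Sentinel value to handle the last range
--
--     ranges = []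
--     start = prev = sorted_values[0]
--     for value in sorted_values[1:]:
--         if value is not None and value == prev + 1:
--             prev = value
--         else:
--             assert start is not None
--             if start == prev:
--                 ranges.append(f"{start}")
--             elif start + 1 == prev:
--                 ranges.append(f"{start},{prev}")
--             else:
--                 ranges.append(f"{start}...{prev}")
--             start = prev = value
--
--     return ",".join(ranges)
-- ===== SOURCE B (Python) =====
-- def to_interval(values):
--     """Format the distinct integers as a sorted comma/range interval string.
--
--     Boundary detection via set membership: v begins a maximal consecutive run
--     iff v-1 is not in the set, and ends one iff v+1 is not in the set; the
--     sorted starts and ends then pair up positionally - no sequential scan with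
--     prev/start state is needed.
--     """
--     s = set(values)
--     starts = sorted(v for v in s if v - 1 not in s)
--     ends = sorted(v for v in s if v + 1 not in s)
--     parts = []
--     for a, b in zip(starts, ends):
--         if a == b:
--             parts.append(str(a))
--         elif b == a + 1:
--             parts.append(f"{a},{b}")
--         else:
--             parts.append(f"{a}...{b}")
--     return ",".join(parts)
-- ===== Notes on version B (the rewrite author's own statement) =====
-- stated objective: alternative
-- what changed: Replaces A's single sorted scan with a None-sentinel start/prev state machine by set-membership boundary detection: v starts a run iff v-1 is not in the set and ends one iff v+1 is not in the set; the sorted starts and ends are zipped positionally and formatted, with no sequential run-building state at all.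
import Mathlib
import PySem

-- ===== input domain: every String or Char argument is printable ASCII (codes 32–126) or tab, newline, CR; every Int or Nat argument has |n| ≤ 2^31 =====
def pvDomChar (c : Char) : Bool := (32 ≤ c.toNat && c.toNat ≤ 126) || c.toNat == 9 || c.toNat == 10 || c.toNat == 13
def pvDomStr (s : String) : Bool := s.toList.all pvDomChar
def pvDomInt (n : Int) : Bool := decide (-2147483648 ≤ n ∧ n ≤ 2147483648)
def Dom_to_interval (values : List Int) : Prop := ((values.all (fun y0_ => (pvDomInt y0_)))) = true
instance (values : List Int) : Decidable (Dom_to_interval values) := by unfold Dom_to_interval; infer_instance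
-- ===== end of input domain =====

-- B replaces A's sorted scan with a None-sentinel start/prev state machine by set-membership
-- boundary detection (run starts = v with v-1 not in set, run ends = v with v+1 not in set,
-- zipped positionally); a different algorithm of the same cost.

-- ===== PORT A =====
-- emit one range string from the current (start, prev) state (Python's else-branch body);
-- the `| _, _` default is unreachable in A's runs (Python's `assert start is not None`).
def pvEmitA (start prev : Option Int) (ranges : List String) : List String :=
  match start, prev with
  | some a, some p =>
      if a = p then ranges ++ [PySem.Int.toStr a]
      else if a + 1 = p then ranges ++ [PySem.Int.toStr a ++ "," ++ PySem.Int.toStr p]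
      else ranges ++ [PySem.Int.toStr a ++ "..." ++ PySem.Int.toStr p]
  | _, _ => ranges

-- one iteration of A's for-loop; state is (start, prev, ranges)
def pvStepA (st : Option Int × Option Int × List String) (value : Option Int) :
    Option Int × Option Int × List String :=
  match st with
  | (start, prev, ranges) =>
    match value, prev with
    | some v, some p =>
        if v = p + 1 then (start, some v, ranges)
        else (value, value, pvEmitA start prev ranges)
    | _, _ => (value, value, pvEmitA start prev ranges)

def to_interval (values : List Int) : String :=
  let sorted_values : List (Option Int) :=
    (PySem.List.sorted (PySem.Set.ofList values) (fun x => x)).map some ++ [none]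
  match sorted_values with
  | [] => ""   -- unreachable guard: sorted_values always ends with the sentinel
  | first :: rest =>
      let final := rest.foldl pvStepA (first, first, ([] : List String))
      PySem.Str.join "," final.2.2

-- ===== PORT B =====
-- the body of Source B's formatting loop (the three-way if on a pair from zip(starts, ends))
def pvFmtRun (a b : Int) : String :=
  if a = b then PySem.Int.toStr a
  else if b = a + 1 then PySem.Int.toStr a ++ "," ++ PySem.Int.toStr b
  else PySem.Int.toStr a ++ "..." ++ PySem.Int.toStr b

def to_interval_alt (values : List Int) : String :=
  let s := PySem.Set.ofList values
  let starts := PySem.List.sorted (s.filter (fun v => !(decide ((v - 1) ∈ s)))) (fun x => x)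
  let ends := PySem.List.sorted (s.filter (fun v => !(decide ((v + 1) ∈ s)))) (fun x => x)
  let parts := (starts.zip ends).map (fun r => pvFmtRun r.1 r.2)
  PySem.Str.join "," parts

-- ===== PRECONDITION & SPEC =====
def Spec_to_interval (values : List Int) (out : String) : Prop := out = to_interval_alt values
instance (values : List Int) (out : String) : Decidable (Spec_to_interval values out) := by unfold Spec_to_interval; infer_instance

-- ===== CLAIM =====
def Claim_equal_to_interval : Prop := ∀ (values : List Int), Dom_to_interval values → Spec_to_interval values (to_interval values)

-- ===== LEMMAS AND PROOFS =====

-- the run-formatting map as a named function on pairs (proof convenience)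
def pvFmtP (r : Int × Int) : String := pvFmtRun r.1 r.2

-- the maximal runs of a list prefixed by the open run (a, p) (proof-side reference object)
def pvRunsW (a p : Int) : List Int → List (Int × Int)
  | [] => [(a, p)]
  | v :: t => if v = p + 1 then pvRunsW a v t else (a, p) :: pvRunsW v v t

-- run starts / run ends of a tail by ADJACENT comparison, with previous element u
def pvSA (u : Int) : List Int → List Int
  | [] => []
  | v :: t => if v = u + 1 then pvSA v t else v :: pvSA v t

def pvEA (u : Int) : List Int → List Int
  | [] => [u]
  | v :: t => if v = u + 1 then pvEA v t else u :: pvEA v t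

-- A's emit on a live (some, some) state is exactly appending the formatted run
lemma pvEmitA_eq (a p : Int) (rs : List String) :
    pvEmitA (some a) (some p) rs = rs ++ [pvFmtP (a, p)] := by
  show (if a = p then rs ++ [PySem.Int.toStr a]
        else if a + 1 = p then rs ++ [PySem.Int.toStr a ++ "," ++ PySem.Int.toStr p]
        else rs ++ [PySem.Int.toStr a ++ "..." ++ PySem.Int.toStr p]) = rs ++ [pvFmtP (a, p)]
  unfold pvFmtP pvFmtRun
  by_cases h1 : a = p
  · rw [if_pos h1, if_pos h1]
  · rw [if_neg h1, if_neg h1]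
    by_cases h2 : a + 1 = p
    · rw [if_pos h2, if_pos (show p = a + 1 by omega)]
    · rw [if_neg h2, if_neg (show ¬ p = a + 1 by omega)]

-- A's loop produces exactly the formatted runs
lemma pv_loopA (t : List Int) : ∀ (a p : Int) (rs : List String),
    ((t.map some ++ [none]).foldl pvStepA (some a, some p, rs)).2.2
      = rs ++ (pvRunsW a p t).map pvFmtP := by
  induction t with
  | nil =>
      intro a p rs
      simp only [List.map_nil, List.nil_append, List.foldl_cons, List.foldl_nil]
      show (pvStepA (some a, some p, rs) none).2.2 = rs ++ (pvRunsW a p []).map pvFmtP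
      show (none, none, pvEmitA (some a) (some p) rs).2.2 = _
      rw [pvEmitA_eq]; rfl
  | cons v t ih =>
      intro a p rs
      simp only [List.map_cons, List.cons_append, List.foldl_cons]
      show ((t.map some ++ [none]).foldl pvStepA
        (if v = p + 1 then (some a, some v, rs)
         else (some v, some v, pvEmitA (some a) (some p) rs))).2.2 = _
      unfold pvRunsW
      by_cases h : v = p + 1
      · rw [if_pos h, if_pos h, ih]
      · rw [if_neg h, if_neg h, pvEmitA_eq, ih]
        simp

-- the zipped adjacent starts/ends are exactly the runs
lemma pv_zip_runs (t : List Int) : ∀ (a p : Int),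
    (a :: pvSA p t).zip (pvEA p t) = pvRunsW a p t := by
  induction t with
  | nil => intro a p; rfl
  | cons v t ih =>
      intro a p
      unfold pvSA pvEA pvRunsW
      by_cases h : v = p + 1
      · rw [if_pos h, if_pos h, if_pos h, ih]
      · rw [if_neg h, if_neg h, if_neg h]
        show (a, p) :: (v :: pvSA v t).zip (pvEA v t) = _
        rw [ih]

-- global-membership run-start filter equals the adjacent version, on a strictly sorted tail
lemma pv_filtS (t : List Int) : ∀ (u : Int) (s : List Int),
    (u :: t).Pairwise (· < ·) →
    (∀ w ∈ s, w < u ∨ w ∈ u :: t) →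
    (∀ w ∈ u :: t, w ∈ s) →
    t.filter (fun v => !(decide ((v - 1) ∈ s))) = pvSA u t := by
  induction t with
  | nil => intro u s _ _ _; rfl
  | cons v t ih =>
      intro u s hp hcov hsub
      have huv : u < v := (List.pairwise_cons.1 hp).1 v (by simp)
      have hp' : (v :: t).Pairwise (· < ·) := (List.pairwise_cons.1 hp).2
      have hvt : ∀ w ∈ t, v < w := (List.pairwise_cons.1 hp').1
      have hmem : ((v - 1) ∈ s) ↔ v = u + 1 := by
        constructor
        · intro hm
          rcases hcov _ hm with h1 | h1
          · omega
          · simp only [List.mem_cons] at h1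
            rcases h1 with h1 | h1 | h1
            · omega
            · omega
            · have := hvt _ h1; omega
        · intro hv
          have : v - 1 = u := by omega
          rw [this]; exact hsub u (by simp)
      rw [List.filter_cons]
      unfold pvSA
      by_cases h : v = u + 1
      · rw [if_pos h]
        have : (!(decide ((v - 1) ∈ s))) = false := by
          simp [hmem.2 h]
        rw [this]
        simp only [Bool.false_eq_true, if_false]
        exact ih v s hp' (by
          intro w hw
          rcases hcov w hw with h1 | h1
          · left; omega
          · simp only [List.mem_cons] at h1
            rcases h1 with h1 | h1
            · left; omega
            · right; simpa using h1)
          (fun w hw => hsub w (List.mem_cons_of_mem u hw))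
      · rw [if_neg h]
        have : (!(decide ((v - 1) ∈ s))) = true := by
          simp only [Bool.not_eq_true', decide_eq_false_iff_not]
          intro hm; exact h (hmem.1 hm)
        rw [this, if_pos rfl]
        congr 1
        exact ih v s hp' (by
          intro w hw
          rcases hcov w hw with h1 | h1
          · left; omega
          · simp only [List.mem_cons] at h1
            rcases h1 with h1 | h1
            · left; omega
            · right; simpa using h1)
          (fun w hw => hsub w (List.mem_cons_of_mem u hw))

-- global-membership run-end filter equals the adjacent version, on a strictly sorted list
lemma pv_filtE (t : List Int) : ∀ (u : Int) (s : List Int),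
    (u :: t).Pairwise (· < ·) →
    (∀ w ∈ s, w ≤ u ∨ w ∈ t) →
    (∀ w ∈ u :: t, w ∈ s) →
    (u :: t).filter (fun v => !(decide ((v + 1) ∈ s))) = pvEA u t := by
  induction t with
  | nil =>
      intro u s _ hcov _
      rw [List.filter_cons]
      have : (!(decide ((u + 1) ∈ s))) = true := by
        simp only [Bool.not_eq_true', decide_eq_false_iff_not]
        intro hm
        rcases hcov _ hm with h1 | h1
        · omega
        · simp at h1
      rw [this, if_pos rfl]; rfl
  | cons v t ih =>
      intro u s hp hcov hsub
      have huv : u < v := (List.pairwise_cons.1 hp).1 v (by simp)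
      have hp' : (v :: t).Pairwise (· < ·) := (List.pairwise_cons.1 hp).2
      have hvt : ∀ w ∈ t, v < w := (List.pairwise_cons.1 hp').1
      have hmem : ((u + 1) ∈ s) ↔ v = u + 1 := by
        constructor
        · intro hm
          rcases hcov _ hm with h1 | h1
          · omega
          · simp only [List.mem_cons] at h1
            rcases h1 with h1 | h1
            · omega
            · have := hvt _ h1; omega
        · intro hv; rw [← hv]; exact hsub v (by simp)
      have hcov' : ∀ w ∈ s, w ≤ v ∨ w ∈ t := by
        intro w hw
        rcases hcov w hw with h1 | h1
        · left; omega
        · simp only [List.mem_cons] at h1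
          rcases h1 with h1 | h1
          · left; omega
          · right; exact h1
      have hsub' : ∀ w ∈ v :: t, w ∈ s := fun w hw => hsub w (List.mem_cons_of_mem u hw)
      rw [List.filter_cons]
      unfold pvEA
      by_cases h : v = u + 1
      · rw [if_pos h]
        have : (!(decide ((u + 1) ∈ s))) = false := by simp [hmem.2 h]
        rw [this]
        simp only [Bool.false_eq_true, if_false]
        exact ih v s hp' hcov' hsub'
      · rw [if_neg h]
        have : (!(decide ((u + 1) ∈ s))) = true := by
          simp only [Bool.not_eq_true', decide_eq_false_iff_not]
          intro hm; exact h (hmem.1 hm)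
        rw [this, if_pos rfl]
        congr 1
        exact ih v s hp' hcov' hsub'

-- ===== VERDICT =====
theorem to_interval_spec : Claim_equal_to_interval := by
  intro values _
  show to_interval values = to_interval_alt values
  simp only [to_interval, to_interval_alt]
  cases hs : PySem.List.sorted (PySem.Set.ofList values) (fun x => x) with
  | nil =>
      have hset : PySem.Set.ofList values = [] := by
        exact (PySem.List.sorted_eq_nil_iff _ _ _).1 hs
      rw [hset]
      rfl
  | cons x t =>
      set s := PySem.Set.ofList values with hsdef
      have hpl : (x :: t).Pairwise (· < ·) := by
        have := PySem.List.sorted_ofList_pairwise_lt (xs := values)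
        rw [← hsdef, hs] at this
        exact this
      have hperm : (x :: t).Perm s := by
        have := PySem.List.sorted_perm (xs := s) (key := fun x => x) (rev := false)
        rw [hs] at this
        exact this
      have hmemL : ∀ w, w ∈ s ↔ w ∈ x :: t := fun w => (hperm.mem_iff).symm
      -- starts: sorted(filter over s) = x :: pvSA x t
      have hxmin : ∀ w ∈ t, x < w := (List.pairwise_cons.1 hpl).1
      have hfS : (x :: t).filter (fun v => !(decide ((v - 1) ∈ s))) = x :: pvSA x t := by
        rw [List.filter_cons]
        have : (!(decide ((x - 1) ∈ s))) = true := by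
          simp only [Bool.not_eq_true', decide_eq_false_iff_not]
          intro hm
          rcases List.mem_cons.1 ((hmemL _).1 hm) with h1 | h1
          · omega
          · have := hxmin _ h1; omega
        rw [this, if_pos rfl]
        congr 1
        exact pv_filtS t x s hpl
          (fun w hw => Or.inr ((hmemL w).1 hw))
          (fun w hw => (hmemL w).2 hw)
      have hfE : (x :: t).filter (fun v => !(decide ((v + 1) ∈ s))) = pvEA x t := by
        exact pv_filtE t x s hpl
          (by
            intro w hw
            rcases List.mem_cons.1 ((hmemL w).1 hw) with h1 | h1
            · left; omega
            · right; exact h1)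
          (fun w hw => (hmemL w).2 hw)
      have hsortS : PySem.List.sorted (s.filter (fun v => !(decide ((v - 1) ∈ s)))) (fun x => x)
          = x :: pvSA x t := by
        apply PySem.List.sorted_eq_of_perm_of_pairwise_lt
        · rw [← hfS]; exact (hperm.filter _)
        · rw [← hfS]; exact hpl.filter _
      have hsortE : PySem.List.sorted (s.filter (fun v => !(decide ((v + 1) ∈ s)))) (fun x => x)
          = pvEA x t := by
        apply PySem.List.sorted_eq_of_perm_of_pairwise_lt
        · rw [← hfE]; exact (hperm.filter _)
        · rw [← hfE]; exact hpl.filter _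
      simp only [List.map_cons, List.cons_append]
      rw [hsortS, hsortE, pv_zip_runs]
      have hl := pv_loopA t x x []
      rw [show (fun r : Int × Int => pvFmtRun r.1 r.2) = pvFmtP from rfl, hl, List.nil_append]
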